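-- pv_equiv track=rewrite | github.com/alexandermorozzov/transport-frames-qgis-plugin | algs/add_roads_algorithm.py | _parse_output_uri
-- ===== SOURCE A (Python) =====
-- def _parse_output_uri(uri: str):
--     if "|" not in uri:
--         return uri, None
--
--     parts = uri.split("|")
--     path = parts[0]
--     layer_name = None
--     for token in parts[1:]:
--         if token.startswith("layername="):
--             layer_name = token.split("=", 1)[1]
--             break
--     return path, layer_name
-- ===== SOURCE B (Python) =====
-- def _parse_output_uri(uri: str):
--     bar = uri.find("|")
--     if bar == -1:
--         return uri, None
--     path = uri[:bar]
--     idx = uri.find("|layername=")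
--     if idx == -1:
--         return path, None
--     start = idx + len("|layername=")
--     end = uri.find("|", start)
--     return path, (uri[start:] if end == -1 else uri[start:end])
-- ===== Notes on version B (the rewrite author's own statement) =====
-- stated objective: alternative
-- what changed: B replaces A's split-into-tokens-and-scan loop by direct substring search: find the first '|' for the path and the first occurrence of '|layername=' for the layer name, then slice up to the next '|'; no token list is built.
import Mathlib
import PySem

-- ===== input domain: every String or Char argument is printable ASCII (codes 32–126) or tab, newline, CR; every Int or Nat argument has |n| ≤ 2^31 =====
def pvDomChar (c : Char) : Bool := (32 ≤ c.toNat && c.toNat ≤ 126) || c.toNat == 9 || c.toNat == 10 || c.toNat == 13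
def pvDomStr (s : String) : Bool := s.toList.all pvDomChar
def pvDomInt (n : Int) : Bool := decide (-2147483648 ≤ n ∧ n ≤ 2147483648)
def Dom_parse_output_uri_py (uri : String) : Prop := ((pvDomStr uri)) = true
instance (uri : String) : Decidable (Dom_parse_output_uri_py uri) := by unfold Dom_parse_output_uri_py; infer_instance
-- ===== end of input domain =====

-- B replaces A's split-into-tokens-and-scan loop by direct substring search for "|layername=" plus slicing; return values are proved identical (objective: alternative).

-- ===== PORT A =====
-- the 'for token in parts[1:]: if token.startswith(...): ...; break' loop of A
def pvAScan : List (List Char) → Option (List Char)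
  | [] => none
  | t :: rest =>
      if PySem.Chars.startswith t "layername=".toList then
        some ((PySem.Chars.splitOnMax t ['='] 1).getD 1 [])   -- token.split("=", 1)[1]
      else pvAScan rest

def parse_output_uri_py (uri : String) : String × Option String :=
  let s := uri.toList
  if PySem.Chars.isIn ['|'] s = false then (uri, none)
  else
    let parts := PySem.Chars.splitOn s ['|']
    let path := parts.headD []                 -- parts[0] (split never returns [])
    let layer := pvAScan (parts.drop 1)        -- parts[1:]
    (String.ofList path, layer.map String.ofList)

-- ===== PORT B =====
def parse_output_uri_py_alt (uri : String) : String × Option String :=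
  let s := uri.toList
  let bar := PySem.Chars.find s ['|']
  if bar = -1 then (uri, none)
  else
    let path := String.ofList (PySem.List.slice s none (some bar))   -- uri[:bar]
    let idx := PySem.Chars.find s "|layername=".toList
    if idx = -1 then (path, none)
    else
      let start := idx + 11                                      -- len("|layername=")
      let e := PySem.Chars.findFrom s ['|'] start                -- uri.find("|", start)
      if e = -1 then (path, some (String.ofList (PySem.List.slice s (some start) none)))
      else (path, some (String.ofList (PySem.List.slice s (some start) (some e))))

-- ===== PRECONDITION & SPEC =====
def Spec_parse_output_uri_py (uri : String) (out : String × Option String) : Prop := out = parse_output_uri_py_alt uri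
instance (uri : String) (out : String × Option String) : Decidable (Spec_parse_output_uri_py uri out) := by unfold Spec_parse_output_uri_py; infer_instance

-- ===== CLAIM (what is proved, stated in full; the proofs are below) =====
def Claim_equal_parse_output_uri_py : Prop := ∀ (uri : String), Dom_parse_output_uri_py uri → Spec_parse_output_uri_py uri (parse_output_uri_py uri)

-- ===== LEMMAS AND PROOFS =====

def pvSplit : List Char → List (List Char)
  | [] => [[]]
  | c :: r => if c = '|' then [] :: pvSplit r else (pvSplit r).modifyHead (c :: ·)

theorem pvSplit_ne_nil (s : List Char) : pvSplit s ≠ [] := by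
  induction s with
  | nil => simp [pvSplit]
  | cons c r ih =>
      by_cases h : c = '|' <;> simp [pvSplit, h]
      exact fun hc => ih (by simpa using congrArg List.length hc)

theorem pvSplitOn_go_spec : ∀ (fuel : Nat) (l cur : List Char) (acc : List (List Char)),
    l.length < fuel →
    PySem.Chars.splitOn.go ['|'] fuel l cur acc
      = acc.reverse ++ (pvSplit l).modifyHead (cur.reverse ++ ·) := by
  intro fuel
  induction fuel with
  | zero => intro l cur acc h; omega
  | succ n ih =>
      intro l cur acc h
      cases l with
      | nil => simp [PySem.Chars.splitOn.go, pvSplit]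
      | cons c rest =>
          by_cases hc : c = '|'
          · subst hc
            rw [PySem.Chars.splitOn.go]
            rw [if_pos (by simp [List.isPrefixOf]), ih _ _ _ (by simpa using Nat.lt_of_succ_lt_succ h)]
            simp only [pvSplit, if_pos rfl, List.reverse_cons, List.append_assoc,
              List.singleton_append, List.append_nil, List.reverse_nil, List.nil_append]
            cases hx : pvSplit rest <;> simp [hx]
          · rw [PySem.Chars.splitOn.go]
            rw [if_neg (by simp [List.isPrefixOf]; exact fun he => hc he.symm), ih _ _ _ (by simpa using Nat.lt_of_succ_lt_succ h)]
            obtain ⟨t, ts, hts⟩ := List.exists_cons_of_ne_nil (pvSplit_ne_nil rest)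
            simp [pvSplit, hc, hts]

theorem splitOn_eq_pvSplit (s : List Char) : PySem.Chars.splitOn s ['|'] = pvSplit s := by
  rw [PySem.Chars.splitOn, pvSplitOn_go_spec _ _ _ _ (by omega)]
  cases hx : pvSplit s <;> simp [hx]

theorem pvSplit_no_sep {s : List Char} (h : '|' ∉ s) : pvSplit s = [s] := by
  induction s with
  | nil => rfl
  | cons c r ih =>
      have hc : ¬ c = '|' := by intro he; exact h (by simp [he])
      rw [pvSplit, if_neg hc, ih (fun hm => h (List.mem_cons_of_mem _ hm))]
      rfl

theorem pvSplit_append {t r : List Char} (h : '|' ∉ t) :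
    pvSplit (t ++ '|' :: r) = t :: pvSplit r := by
  induction t with
  | nil => simp [pvSplit]
  | cons c t' ih =>
      have hc : ¬ c = '|' := by intro he; exact h (by simp [he])
      rw [List.cons_append, pvSplit, if_neg hc, ih (fun hm => h (List.mem_cons_of_mem _ hm))]
      rfl

theorem pvGo0 : ∀ (fuel : Nat) (l cur : List Char) (acc : List (List Char)), 0 < fuel →
    PySem.Chars.splitOnMax.go ['='] fuel 0 l cur acc = ((cur.reverse ++ l) :: acc).reverse := by
  intro fuel l cur acc h
  match fuel, h with
  | Nat.succ n, _ =>
    cases l with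
    | nil => rw [PySem.Chars.splitOnMax.go] <;> simp
    | cons c rest => rw [PySem.Chars.splitOnMax.go, if_pos rfl]

theorem pvGo1_spec : ∀ (fuel : Nat) (l cur : List Char) (acc : List (List Char)), l.length < fuel →
    PySem.Chars.splitOnMax.go ['='] fuel 1 l cur acc =
      if '=' ∈ l then acc.reverse ++ [cur.reverse ++ l.takeWhile (· ≠ '='), (l.dropWhile (· ≠ '=')).drop 1]
      else acc.reverse ++ [cur.reverse ++ l] := by
  intro fuel
  induction fuel with
  | zero => intro l cur acc h; omega
  | succ n ih =>
      intro l cur acc h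
      cases l with
      | nil => rw [PySem.Chars.splitOnMax.go] <;> simp
      | cons c rest =>
          rw [PySem.Chars.splitOnMax.go, if_neg (by omega)]
          by_cases hc : c = '='
          · subst hc
            rw [if_pos (by simp [List.isPrefixOf])]
            rw [pvGo0 _ _ _ _ (by simp at h; omega)]
            simp [List.takeWhile_cons, List.dropWhile_cons]
          · rw [if_neg (by simp [List.isPrefixOf]; exact fun he => hc he.symm)]
            rw [ih _ _ _ (by simpa using Nat.lt_of_succ_lt_succ h)]
            by_cases hm : '=' ∈ rest
            · simp [hm, hc, List.takeWhile_cons, List.dropWhile_cons]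
            · simp [hm, hc]
              exact fun he => hc he.symm

theorem pvSplitOnMax_token (t' : List Char) :
    PySem.Chars.splitOnMax ("layername=".toList ++ t') ['='] 1 = ["layername".toList, t'] := by
  rw [PySem.Chars.splitOnMax, if_neg (by omega)]
  have h1 : (1 : Int).toNat = 1 := rfl
  rw [h1, pvGo1_spec _ _ _ _ (by omega)]
  rw [if_pos (by simp)]
  have hp : "layername=".toList = ['l','a','y','e','r','n','a','m','e','='] := by decide
  rw [hp]
  simp [List.takeWhile_cons]

theorem pvSingleton_prefix {c : Char} {l : List Char} : [c] <+: l ↔ l[0]? = some c := by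
  cases l with
  | nil => simp
  | cons x r =>
      constructor
      · intro h; have := List.cons_prefix_cons.mp h; simp [this.1]
      · intro h; simp at h; exact h ▸ ⟨r, by simp⟩

theorem pvFind_singleton_neg {s : List Char} {c : Char} :
    PySem.Chars.find s [c] = -1 ↔ c ∉ s := by
  rw [PySem.Chars.find_eq_neg_one_iff, List.singleton_infix_iff]

theorem pvTake_eq_takeWhile (c : Char) : ∀ (n : Nat) (s : List Char),
    (∀ i (h : i < s.length), i < n → s[i] ≠ c) → (∀ (h : n < s.length), s[n] = c) →
    s.take n = s.takeWhile (· ≠ c) := by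
  intro n
  induction n with
  | zero =>
      intro s h1 h2
      cases s with
      | nil => simp
      | cons x r => rw [List.take_zero, List.takeWhile_cons, if_neg (by simpa using h2 (by simp))]
  | succ m ih =>
      intro s h1 h2
      cases s with
      | nil => simp
      | cons x r =>
          have hx : x ≠ c := h1 0 (by simp) (by omega)
          rw [List.take_succ_cons, List.takeWhile_cons, if_pos (by simp [hx])]
          rw [ih r (fun i hi hlt => h1 (i+1) (by simpa using hi) (by omega))
                (fun h => h2 (by simpa using h))]

theorem pvTake_find_singleton {s : List Char} {c : Char}
    (h : 0 ≤ PySem.Chars.find s [c]) :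
    s.take (PySem.Chars.find s [c]).toNat = s.takeWhile (· ≠ c) := by
  obtain ⟨h1, h2⟩ := PySem.Chars.find_spec h
  apply pvTake_eq_takeWhile
  · intro i hi hlt he
    exact h2 i hlt (pvSingleton_prefix.mpr (by rw [List.getElem?_drop, Nat.add_zero, List.getElem?_eq_getElem hi, he]))
  · intro hlt
    have := pvSingleton_prefix.mp h1
    rw [List.getElem?_drop] at this
    rw [Nat.add_zero, List.getElem?_eq_getElem hlt] at this
    simpa using this

theorem pvInfix_iff_drop {sub s : List Char} : sub <:+: s ↔ ∃ j, sub <+: s.drop j := by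
  rw [← PySem.Chars.isIn_iff_infix, ← PySem.Chars.exists_prefix_drop_iff_isIn]

theorem pvFind_shift (u v sub : List Char)
    (h : ∀ j, j < u.length → ¬ sub <+: (u ++ v).drop j) :
    PySem.Chars.find (u ++ v) sub
      = if PySem.Chars.find v sub = -1 then -1 else (u.length : Int) + PySem.Chars.find v sub := by
  by_cases hv : PySem.Chars.find v sub = -1
  · rw [if_pos hv, PySem.Chars.find_eq_neg_one_iff]
    rw [PySem.Chars.find_eq_neg_one_iff] at hv
    intro hinf
    obtain ⟨j, hj⟩ := pvInfix_iff_drop.mp hinf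
    by_cases hjl : j < u.length
    · exact h j hjl hj
    · rw [List.drop_append] at hj
      have : u.drop j = [] := by simp; omega
      rw [this, List.nil_append] at hj
      exact hv (pvInfix_iff_drop.mpr ⟨j - u.length, hj⟩)
  · rw [if_neg hv]
    have hv0 : 0 ≤ PySem.Chars.find v sub := by
      rcases lt_or_ge (PySem.Chars.find v sub) 0 with h' | h'
      · exact absurd (by omega : PySem.Chars.find v sub ≤ -1)
          (by have := PySem.Chars.neg_one_le_find (s := v) (sub := sub); omega)
      · exact h'
    obtain ⟨hm1, hm2⟩ := PySem.Chars.find_spec hv0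
    set m := (PySem.Chars.find v sub).toNat with hm
    have hpref : sub <+: (u ++ v).drop (u.length + m) := by
      rw [List.drop_append]
      have : u.drop (u.length + m) = [] := by simp
      rw [this, List.nil_append]
      simpa using hm1
    have hn0 : 0 ≤ PySem.Chars.find (u ++ v) sub := by
      rw [PySem.Chars.find_nonneg_iff]
      exact pvInfix_iff_drop.mpr ⟨u.length + m, hpref⟩
    obtain ⟨hn1, hn2⟩ := PySem.Chars.find_spec hn0
    set n := (PySem.Chars.find (u ++ v) sub).toNat with hn
    have hle : n ≤ u.length + m := by
      by_contra hgt
      exact hn2 (u.length + m) (by omega) hpref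
    have hge1 : u.length ≤ n := by
      by_contra hlt
      exact h n (by omega) hn1
    have hge : u.length + m ≤ n := by
      have : sub <+: v.drop (n - u.length) := by
        rw [List.drop_append] at hn1
        have he : u.drop n = [] := by simp; omega
        rwa [he, List.nil_append] at hn1
      by_contra hgt
      exact hm2 (n - u.length) (by omega) this
    have : n = u.length + m := by omega
    omega

theorem pvTakeWhile_bar {t : List Char} (h : '|' ∉ t) (x : List Char) :
    (t ++ '|' :: x).takeWhile (· ≠ '|') = t := by
  induction t with
  | nil => simp [List.takeWhile_cons]
  | cons c t' ih =>
      have hc : ¬ c = '|' := fun he => h (by simp [he])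
      rw [List.cons_append, List.takeWhile_cons, if_pos (by simp [hc]),
        ih (fun hm => h (List.mem_cons_of_mem _ hm))]

theorem pvTakeWhile_no_bar {t : List Char} (h : '|' ∉ t) :
    t.takeWhile (· ≠ '|') = t :=
  List.takeWhile_eq_self_iff.mpr (fun c hc => by simp; exact fun he => h (he ▸ hc))

theorem pvPrefix_bar {l : List Char} {j : Nat} (h : "|layername=".toList <+: l.drop j) :
    l[j]? = some '|' := by
  have : "|layername=".toList = '|' :: "layername=".toList := by decide
  rw [this] at h
  obtain ⟨t, ht⟩ := h
  have : (l.drop j)[0]? = some '|' := by rw [← ht]; simp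
  rwa [List.getElem?_drop, Nat.add_zero] at this

theorem pvPrefix_no_bar {q t x : List Char} (hq : '|' ∉ q) (h : q <+: t ++ '|' :: x) :
    q <+: t := by
  rcases List.prefix_or_prefix_of_prefix h (List.prefix_append t ('|' :: x)) with h' | h'
  · exact h'
  · obtain ⟨u, hu⟩ := h'
    cases u with
    | nil => rw [← hu]; simp
    | cons a u' =>
        exfalso
        have ha : a = '|' := by
          have h2 : q[t.length]? = some a := by rw [← hu]; simp
          have h3 : q[t.length]? = (t ++ '|' :: x)[t.length]? := by
            obtain ⟨w, hw⟩ := h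
            rw [← hw, List.getElem?_append_left (by
              have := congrArg List.length hu; simp at this; omega)]
          rw [h3] at h2
          simp at h2
          exact h2.symm
        exact hq (by rw [← hu, ha]; exact List.mem_append_right _ List.mem_cons_self)

theorem pvFind_of_prefix {l sub : List Char} (h : sub <+: l) : PySem.Chars.find l sub = 0 := by
  have h0 : 0 ≤ PySem.Chars.find l sub :=
    (PySem.Chars.find_nonneg_iff l sub).mpr (pvInfix_iff_drop.mpr ⟨0, by simpa using h⟩)
  obtain ⟨h1, h2⟩ := PySem.Chars.find_spec h0
  by_contra hne
  exact h2 0 (by omega) (by simpa using h)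

theorem pvScan_eq_find_aux : ∀ (N : Nat) (r : List Char), r.length ≤ N →
    pvAScan (pvSplit r)
      = (if PySem.Chars.find ('|' :: r) ("|layername=".toList) = -1 then none
         else some ((('|' :: r).drop ((PySem.Chars.find ('|' :: r) ("|layername=".toList)).toNat + 11)).takeWhile (· ≠ '|'))) := by
  intro N
  induction N with
  | zero =>
      intro r hN
      have : r = [] := List.eq_nil_of_length_eq_zero (by omega)
      subst this
      rw [if_pos ?hneg]
      · simp [pvSplit, pvAScan, PySem.Chars.startswith, List.isPrefixOf]
      case hneg =>
        rw [PySem.Chars.find_eq_neg_one_iff]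
        intro hinf
        have := List.IsInfix.length_le hinf
        simp at this
  | succ N ih =>
      intro r hN
      have hbp : "|layername=".toList = '|' :: "layername=".toList := by decide
      have hqb : '|' ∉ "layername=".toList := by decide
      by_cases hmem : '|' ∈ r
      · -- r = t ++ '|' :: rest', '|' ∉ t
        obtain ⟨c, d', hd⟩ := List.exists_cons_of_ne_nil
          (show r.dropWhile (· ≠ '|') ≠ [] by
            intro h0
            rw [List.dropWhile_eq_nil_iff] at h0
            simpa using h0 '|' hmem)
        have hc : c = '|' := by
          have := List.head?_dropWhile_not (fun x => decide (x ≠ '|')) r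
          rw [hd] at this
          simpa using this
        subst hc
        have hr : r = r.takeWhile (· ≠ '|') ++ '|' :: d' := by
          conv_lhs => rw [← List.takeWhile_append_dropWhile (p := (· ≠ '|')) (l := r)]
          rw [hd]
        set t := r.takeWhile (· ≠ '|') with htdef
        have htb : '|' ∉ t := fun hm => by simpa using List.mem_takeWhile_imp hm
        have hsplit : pvSplit r = t :: pvSplit d' := by rw [hr] at hmem ⊢; exact pvSplit_append htb
        rw [hsplit]
        by_cases hp : PySem.Chars.startswith t ("layername=".toList) = true
        · -- the first scanned token matches
          rw [pvAScan, if_pos hp]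
          have hpre : "layername=".toList <+: t :=
            List.isPrefixOf_iff_prefix.mp (by exact hp)
          obtain ⟨t'', ht''⟩ := hpre
          have hfind0 : PySem.Chars.find ('|' :: r) ("|layername=".toList) = 0 := by
            apply pvFind_of_prefix
            rw [hbp, List.cons_prefix_cons]
            refine ⟨rfl, ?_⟩
            calc "layername=".toList <+: t := ⟨t'', ht''⟩
              _ <+: r := htdef ▸ List.takeWhile_prefix _
          rw [hfind0]
          rw [if_neg (by omega)]
          have hdrop : ('|' :: r).drop ((0 : Int).toNat + 11) = t'' ++ '|' :: d' := by
            show ('|' :: r).drop 11 = t'' ++ '|' :: d'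
            rw [hr, ← ht'']
            show (("layername=".toList ++ t'') ++ '|' :: d').drop 10 = t'' ++ '|' :: d'
            rw [List.append_assoc, List.drop_append]
            have e1 : ("layername=".toList).drop 10 = [] := by decide
            have e2 : ("layername=".toList).length = 10 := by decide
            rw [e1, e2, List.nil_append, Nat.sub_self, List.drop_zero]
          have ht''b : '|' ∉ t'' := fun hm => htb (by rw [← ht'']; exact List.mem_append_right _ hm)
          rw [hdrop, pvTakeWhile_bar ht''b, ← ht'', pvSplitOnMax_token]
          rfl
        · rw [pvAScan, if_neg hp]
          have hnp : ¬ "layername=".toList <+: t := fun hpre =>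
            hp (List.isPrefixOf_iff_prefix.mpr hpre)
          have hshape : ('|' :: r) = ('|' :: t) ++ ('|' :: d') := by rw [List.cons_append, ← hr]
          have hside : ∀ j, j < ('|' :: t).length →
              ¬ "|layername=".toList <+: (('|' :: t) ++ ('|' :: d')).drop j := by
            intro j hj hpre
            cases j with
            | zero =>
                  rw [hbp, List.drop_zero, ← hshape, List.cons_prefix_cons] at hpre
                  exact hnp (pvPrefix_no_bar hqb (hr ▸ hpre.2))
              | succ i =>
                  have hj' : i < t.length := by simpa using hj
                  have := pvPrefix_bar hpre
                  rw [← hshape] at this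
                  have hgt : r[i]? = some '|' := by simpa using this
                  rw [hr, List.getElem?_append_left hj'] at hgt
                  exact htb (by
                    have := List.getElem?_eq_getElem (l := t) hj'
                    rw [this] at hgt
                    simp at hgt
                    exact hgt ▸ List.getElem_mem hj')
          have hshift : PySem.Chars.find ('|' :: r) ("|layername=".toList)
              = if PySem.Chars.find ('|' :: d') ("|layername=".toList) = -1 then -1
                else ((t.length + 1 : Nat) : Int) + PySem.Chars.find ('|' :: d') ("|layername=".toList) := by
            rw [hshape]
            have := pvFind_shift ('|' :: t) ('|' :: d') ("|layername=".toList) hside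
            simpa using this
          have hlen : d'.length ≤ N := by
            have := congrArg List.length hr
            simp at this
            omega
          rw [ih d' hlen]
          by_cases hv : PySem.Chars.find ('|' :: d') ("|layername=".toList) = -1
          · rw [if_pos hv, if_pos (by rw [hshift, if_pos hv])]
          · rw [if_neg hv] at hshift
            have hv0 : 0 ≤ PySem.Chars.find ('|' :: d') ("|layername=".toList) := by
              have := PySem.Chars.neg_one_le_find ('|' :: d') ("|layername=".toList); omega
            rw [if_neg hv, if_neg (by rw [hshift]; omega)]
            congr 1
            rw [hshift]
            have htn : ((((t.length + 1 : Nat) : Int) + PySem.Chars.find ('|' :: d') ("|layername=".toList)).toNat + 11)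
                = (t.length + 1) + ((PySem.Chars.find ('|' :: d') ("|layername=".toList)).toNat + 11) := by omega
            rw [htn, hshape, List.drop_append]
            have : ('|' :: t).drop (t.length + 1 + ((PySem.Chars.find ('|' :: d') ("|layername=".toList)).toNat + 11)) = ([] : List Char) := by
              apply List.drop_eq_nil_of_le; simp only [List.length_cons]; omega
            rw [this, List.nil_append]
            have : t.length + 1 + ((PySem.Chars.find ('|' :: d') ("|layername=".toList)).toNat + 11) - ('|' :: t).length
                = (PySem.Chars.find ('|' :: d') ("|layername=".toList)).toNat + 11 := by
              simp only [List.length_cons]; omega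
            rw [this]
      · -- '|' ∉ r : the split is [r]; occurrences of "|layername=" in '|'::r exist only at 0
        rw [pvSplit_no_sep hmem]
        by_cases hp : PySem.Chars.startswith r ("layername=".toList) = true
        · rw [pvAScan, if_pos hp]
          obtain ⟨t'', ht''⟩ := List.isPrefixOf_iff_prefix.mp (show List.isPrefixOf _ _ = true from hp)
          have hfind0 : PySem.Chars.find ('|' :: r) ("|layername=".toList) = 0 :=
            pvFind_of_prefix (by rw [hbp, List.cons_prefix_cons]; exact ⟨rfl, ⟨t'', ht''⟩⟩)
          rw [hfind0, if_neg (by omega)]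
          have hdrop : ('|' :: r).drop ((0 : Int).toNat + 11) = t'' := by
            show ('|' :: r).drop 11 = t''
            rw [← ht'']
            show ("layername=".toList ++ t'').drop 10 = t''
            rw [List.drop_append]
            have e1 : ("layername=".toList).drop 10 = [] := by decide
            have e2 : ("layername=".toList).length = 10 := by decide
            rw [e1, e2, List.nil_append, Nat.sub_self, List.drop_zero]
          have ht''nb : '|' ∉ t'' := fun hm => hmem (by rw [← ht'']; exact List.mem_append_right _ hm)
          rw [hdrop, pvTakeWhile_no_bar ht''nb, ← ht'', pvSplitOnMax_token]
          rfl
        · rw [pvAScan, if_neg hp]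
          rw [if_pos ?hneg]
          · rfl
          case hneg =>
            rw [PySem.Chars.find_eq_neg_one_iff]
            intro hinf
            obtain ⟨j, hj⟩ := pvInfix_iff_drop.mp hinf
            cases j with
            | zero =>
                rw [List.drop_zero, hbp, List.cons_prefix_cons] at hj
                exact hp (List.isPrefixOf_iff_prefix.mpr hj.2)
            | succ i =>
                have := pvPrefix_bar hj
                have hmem' : '|' ∈ r := by
                  have h2 : r[i]? = some '|' := by simpa using this
                  exact List.mem_of_getElem? h2
                exact hmem hmem'

theorem pvScan_eq_find (r : List Char) :
    pvAScan (pvSplit r)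
      = (if PySem.Chars.find ('|' :: r) ("|layername=".toList) = -1 then none
         else some ((('|' :: r).drop ((PySem.Chars.find ('|' :: r) ("|layername=".toList)).toNat + 11)).takeWhile (· ≠ '|'))) :=
  pvScan_eq_find_aux r.length r le_rfl

theorem pv_main (uri : String) : parse_output_uri_py uri = parse_output_uri_py_alt uri := by
  unfold parse_output_uri_py parse_output_uri_py_alt
  dsimp only
  set s := uri.toList with hs0
  by_cases h0 : '|' ∈ s
  · have hbar : PySem.Chars.find s ['|'] ≠ -1 := fun he => (pvFind_singleton_neg.mp he) h0
    have hbar0 : 0 ≤ PySem.Chars.find s ['|'] := by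
      have := PySem.Chars.neg_one_le_find s ['|']; omega
    rw [if_neg (by simp [PySem.Chars.isIn, hbar]), if_neg hbar]
    -- decompose s at its first '|'
    obtain ⟨c, d₀, hd⟩ := List.exists_cons_of_ne_nil
      (show s.dropWhile (· ≠ '|') ≠ [] by
        intro hx
        rw [List.dropWhile_eq_nil_iff] at hx
        simpa using hx '|' h0)
    have hc : c = '|' := by
      have := List.head?_dropWhile_not (fun x => decide (x ≠ '|')) s
      rw [hd] at this
      simpa using this
    subst hc
    have hsd : s = s.takeWhile (· ≠ '|') ++ '|' :: d₀ := by
      conv_lhs => rw [← List.takeWhile_append_dropWhile (p := (· ≠ '|')) (l := s)]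
      rw [hd]
    set t₀ := s.takeWhile (· ≠ '|') with ht₀def
    have ht₀ : '|' ∉ t₀ := fun hm => by simpa using List.mem_takeWhile_imp hm
    -- A's parts
    have hparts : PySem.Chars.splitOn s ['|'] = t₀ :: pvSplit d₀ := by
      rw [splitOn_eq_pvSplit]; conv_lhs => rw [hsd]
      exact pvSplit_append ht₀
    rw [hparts]
    -- B's path = A's path
    have hpath : PySem.List.slice s none (some (PySem.Chars.find s ['|'])) = t₀ := by
      rw [← Int.toNat_of_nonneg hbar0, PySem.List.slice_to_natCast,
        pvTake_find_singleton hbar0]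
    rw [hpath]
    -- shift the search for "|layername=" past the path
    have hshift : PySem.Chars.find s ("|layername=".toList)
        = if PySem.Chars.find ('|' :: d₀) ("|layername=".toList) = -1 then -1
          else (t₀.length : Int) + PySem.Chars.find ('|' :: d₀) ("|layername=".toList) := by
      conv_lhs => rw [hsd]
      apply pvFind_shift
      intro j hj hpre
      have hj' : s[j]? = some '|' := by rw [hsd]; exact pvPrefix_bar hpre
      rw [hsd, List.getElem?_append_left hj, List.getElem?_eq_getElem hj] at hj'
      simp at hj'
      exact ht₀ (hj' ▸ List.getElem_mem hj)
    have hscan := pvScan_eq_find d₀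
    by_cases hv : PySem.Chars.find ('|' :: d₀) ("|layername=".toList) = -1
    · rw [List.drop_one, List.tail_cons, hscan, if_pos hv,
        if_pos (by rw [hshift, if_pos hv])]
      rfl
    · have hv0 : 0 ≤ PySem.Chars.find ('|' :: d₀) ("|layername=".toList) := by
        have := PySem.Chars.neg_one_le_find ('|' :: d₀) ("|layername=".toList); omega
      rw [if_neg hv] at hshift
      rw [List.drop_one, List.tail_cons, hscan, if_neg hv,
        if_neg (by rw [hshift]; omega)]
      -- the found position, as a natural number
      set m := (PySem.Chars.find ('|' :: d₀) ("|layername=".toList)).toNat with hm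
      set k := t₀.length + m + 11 with hk
      have hidx : (PySem.Chars.find s ("|layername=".toList)).toNat = t₀.length + m := by
        rw [hshift]; omega
      have hkle : k ≤ s.length := by
        have hnn : 0 ≤ PySem.Chars.find s ("|layername=".toList) := by rw [hshift]; omega
        obtain ⟨hp1, _⟩ := PySem.Chars.find_spec hnn
        have hlen := List.IsPrefix.length_le hp1
        have h11 : ("|layername=".toList).length = 11 := by decide
        rw [h11, List.length_drop] at hlen
        omega
      have hsk : s.drop k = ('|' :: d₀).drop (m + 11) := by
        conv_lhs => rw [hsd]
        rw [List.drop_append]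
        rw [show t₀.drop k = [] from List.drop_eq_nil_of_le (by omega), List.nil_append,
          show k - t₀.length = m + 11 from by omega]
      have hstart : PySem.Chars.find s ("|layername=".toList) + 11 = ((k : Nat) : Int) := by
        rw [hshift]; omega
      rw [hstart, PySem.Chars.findFrom_natCast s ['|'] k hkle]
      by_cases hf : PySem.Chars.find (s.drop k) ['|'] = -1
      · rw [if_pos hf, if_pos rfl, PySem.List.slice_from_natCast, hsk.symm,
          pvTakeWhile_no_bar (fun hm => (pvFind_singleton_neg.mp hf) hm)]
        rfl
      · have hf0 : 0 ≤ PySem.Chars.find (s.drop k) ['|'] := by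
          have := PySem.Chars.neg_one_le_find (s.drop k) ['|']; omega
        rw [if_neg hf, if_neg (by omega)]
        have he : ((k : Nat) : Int) + PySem.Chars.find (s.drop k) ['|']
            = (((k + (PySem.Chars.find (s.drop k) ['|']).toNat : Nat)) : Int) := by omega
        rw [he, PySem.List.slice_natCast,
          show k + (PySem.Chars.find (s.drop k) ['|']).toNat - k
            = (PySem.Chars.find (s.drop k) ['|']).toNat from by omega,
          pvTake_find_singleton hf0, hsk.symm]
        rfl
  · have hbar : PySem.Chars.find s ['|'] = -1 := pvFind_singleton_neg.mpr h0
    rw [if_pos (by simp [PySem.Chars.isIn, hbar]), if_pos hbar]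

-- ===== VERDICT (by name: the statement is the Claim_ definition above) =====
theorem parse_output_uri_py_spec : Claim_equal_parse_output_uri_py := by
  intro uri _
  unfold Spec_parse_output_uri_py
  exact pv_main uri
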